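-- pv_equiv track=rewrite | github.com/AngRoy/NutriVision | app.py | parse_caption_items_naive
-- ===== SOURCE A (Python) =====
-- NUMBER_WORDS = {
--     "zero": 0, "one": 1, "two": 2, "three": 3, "four": 4, "five": 5,
--     "six": 6, "seven": 7, "eight": 8, "nine": 9, "ten": 10, "eleven": 11,
--     "twelve": 12, "thirteen": 13, "fourteen": 14, "fifteen": 15, "twenty": 20,
--     "thirty": 30, "forty": 40, "fifty": 50, "sixty": 60
-- }
--
-- def parse_caption_items_naive(caption, item_map):
--     tokens = caption.lower().split()
--     results = {}
--     i = 0
--     while i < len(tokens):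
--         word = tokens[i].strip(",.!?")
--         qty = 1
--         if word.isdigit():
--             qty = int(word)
--             i += 1
--             if i < len(tokens):
--                 item = tokens[i].strip(",.!?")
--                 i += 1
--             else:
--                 break
--         elif word in NUMBER_WORDS:
--             qty = NUMBER_WORDS[word]
--             i += 1
--             if i < len(tokens):
--                 item = tokens[i].strip(",.!?")
--                 i += 1
--             else:
--                 break
--         else:
--             item = word
--             i += 1
--         if item in item_map:
--             calsEach = item_map[item][0]
--             if item not in results:
--                 results[item] = (0, calsEach)
--             oldQty, cVal = results[item]
--             results[item] = (oldQty + qty, cVal)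
--     return results
-- ===== SOURCE B (Python) =====
-- NUMBER_WORDS = {
--     "zero": 0, "one": 1, "two": 2, "three": 3, "four": 4, "five": 5,
--     "six": 6, "seven": 7, "eight": 8, "nine": 9, "ten": 10, "eleven": 11,
--     "twelve": 12, "thirteen": 13, "fourteen": 14, "fifteen": 15, "twenty": 20,
--     "thirty": 30, "forty": 40, "fifty": 50, "sixty": 60
-- }
--
-- def parse_caption_items_naive(caption, item_map):
--     results = {}
--     pending = None  # quantity waiting for its item token
--     for tok in caption.lower().split():
--         word = tok.strip(",.!?")
--         if pending is not None:
--             item, qty = word, pending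
--             pending = None
--         elif word.isdigit():
--             pending = int(word)
--             continue
--         elif word in NUMBER_WORDS:
--             pending = NUMBER_WORDS[word]
--             continue
--         else:
--             item, qty = word, 1
--         if item in item_map:
--             old = results.get(item, (0, item_map[item][0]))
--             results[item] = (old[0] + qty, old[1])
--     return results
-- ===== Notes on version B (the rewrite author's own statement) =====
-- stated objective: simpler
-- what changed: Replaces A's index-based while loop with explicit look-ahead (i, tokens[i+1]) by a single for-pass carrying a pending-quantity state variable, and replaces A's insert-then-reread results update by a dict.get with default.
import Mathlib
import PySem

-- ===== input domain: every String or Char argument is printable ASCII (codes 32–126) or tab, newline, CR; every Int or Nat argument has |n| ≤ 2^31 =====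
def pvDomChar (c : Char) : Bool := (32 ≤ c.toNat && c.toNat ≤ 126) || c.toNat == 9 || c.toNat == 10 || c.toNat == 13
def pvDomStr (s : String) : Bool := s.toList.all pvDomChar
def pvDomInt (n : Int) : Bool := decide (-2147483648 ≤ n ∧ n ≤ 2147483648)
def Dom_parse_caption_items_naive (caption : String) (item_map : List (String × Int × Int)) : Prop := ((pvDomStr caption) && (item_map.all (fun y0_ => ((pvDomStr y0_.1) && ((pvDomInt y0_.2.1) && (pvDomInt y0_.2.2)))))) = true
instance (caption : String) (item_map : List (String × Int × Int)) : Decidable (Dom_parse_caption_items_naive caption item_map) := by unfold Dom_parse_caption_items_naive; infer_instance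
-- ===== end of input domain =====

-- B replaces A's index-based while loop with look-ahead by a single left fold that carries a
-- pending-quantity state (objective: simpler decomposition; same cost).
-- Module-level constant NUMBER_WORDS (shared by both Pythons), as an association list.
def pvNumberWords : List (String × Int) :=
  [("zero",0),("one",1),("two",2),("three",3),("four",4),("five",5),
   ("six",6),("seven",7),("eight",8),("nine",9),("ten",10),("eleven",11),
   ("twelve",12),("thirteen",13),("fourteen",14),("fifteen",15),("twenty",20),
   ("thirty",30),("forty",40),("fifty",50),("sixty",60)]

-- dict lookup `item_map[item]` / `NUMBER_WORDS[word]`: first match in the association list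
def pvMapCals? (item_map : List (String × Int × Int)) (item : String) : Option Int :=
  (item_map.find? (fun p => p.1 == item)).map (·.2.1)

def pvNumWord? (w : String) : Option Int :=
  (pvNumberWords.find? (fun p => p.1 == w)).map (·.2)

-- ===== PORT A =====
-- the `if item in item_map: … results[item] = (oldQty+qty, cVal)` block of A, transliterated
def pvAUpdate (item_map : List (String × Int × Int)) (res : PySem.Dict String (Int × Int))
    (item : String) (qty : Int) : PySem.Dict String (Int × Int) :=
  match pvMapCals? item_map item with
  | none => res
  | some calsEach =>
    let res1 := if res.contains item then res else res.insert item (0, calsEach)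
    let old := res1.getD item (0, 0)   -- key is present here, the default (0,0) is never used
    res1.insert item (old.1 + qty, old.2)

-- A's while loop over the token index, as recursion consuming the token list
def pvALoop (item_map : List (String × Int × Int)) :
    List String → PySem.Dict String (Int × Int) → PySem.Dict String (Int × Int)
  | [], res => res
  | t :: rest, res =>
    let word := PySem.Str.stripChars t ",.!?"
    if PySem.Str.strIsdigit word then
      match rest with
      | [] => res   -- break
      | t2 :: rest2 =>
        pvALoop item_map rest2
          (pvAUpdate item_map res (PySem.Str.stripChars t2 ",.!?")
            ((PySem.Int.ofStr? word).getD 0))   -- int(word); word.isdigit() ⇒ ofStr? = some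
    else
      match pvNumWord? word with
      | some q =>
        match rest with
        | [] => res   -- break
        | t2 :: rest2 =>
          pvALoop item_map rest2 (pvAUpdate item_map res (PySem.Str.stripChars t2 ",.!?") q)
      | none => pvALoop item_map rest (pvAUpdate item_map res word 1)

def parse_caption_items_naive (caption : String) (item_map : List (String × Int × Int)) : List (String × Int × Int) :=
  (pvALoop item_map (PySem.Str.split₀ (PySem.Str.lower caption)) PySem.Dict.empty).items

-- ===== PORT B =====
-- B's `if item in item_map:` block with results.get
def pvBAdd (item_map : List (String × Int × Int)) (res : PySem.Dict String (Int × Int))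
    (item : String) (qty : Int) : PySem.Dict String (Int × Int) :=
  match pvMapCals? item_map item with
  | none => res
  | some calsEach =>
    let old := res.getD item (0, calsEach)
    res.insert item (old.1 + qty, old.2)

-- one step of B's for loop: state = (pending quantity, results)
def pvBStep (item_map : List (String × Int × Int))
    (st : Option Int × PySem.Dict String (Int × Int)) (tok : String) :
    Option Int × PySem.Dict String (Int × Int) :=
  let word := PySem.Str.stripChars tok ",.!?"
  match st.1 with
  | some q => (none, pvBAdd item_map st.2 word q)
  | none =>
    if PySem.Str.strIsdigit word then (some ((PySem.Int.ofStr? word).getD 0), st.2)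
    else
      match pvNumWord? word with
      | some q => (some q, st.2)
      | none => (none, pvBAdd item_map st.2 word 1)

def parse_caption_items_naive_alt (caption : String) (item_map : List (String × Int × Int)) : List (String × Int × Int) :=
  (((PySem.Str.split₀ (PySem.Str.lower caption)).foldl (pvBStep item_map)
      (none, PySem.Dict.empty)).2).items

-- ===== PRECONDITION & SPEC =====
def Spec_parse_caption_items_naive (caption : String) (item_map : List (String × Int × Int)) (out : List (String × Int × Int)) : Prop := out = parse_caption_items_naive_alt caption item_map
instance (caption : String) (item_map : List (String × Int × Int)) (out : List (String × Int × Int)) : Decidable (Spec_parse_caption_items_naive caption item_map out) := by unfold Spec_parse_caption_items_naive; infer_instance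

-- ===== CLAIM (what is proved, stated in full; the proofs are below) =====
def Claim_equal_parse_caption_items_naive : Prop := ∀ (caption : String) (item_map : List (String × Int × Int)), Dom_parse_caption_items_naive caption item_map → Spec_parse_caption_items_naive caption item_map (parse_caption_items_naive caption item_map)

-- ===== LEMMAS AND PROOFS =====
-- A's two-insert update and B's get-based update build the same dict.
lemma pvUpdate_eq (item_map : List (String × Int × Int)) (res : PySem.Dict String (Int × Int))
    (item : String) (qty : Int) :
    pvAUpdate item_map res item qty = pvBAdd item_map res item qty := by
  unfold pvAUpdate pvBAdd
  cases pvMapCals? item_map item with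
  | none => rfl
  | some c =>
    simp only
    by_cases h : res.contains item = true
    · simp only [h, if_true]
      obtain ⟨v, hv⟩ : ∃ v, res.get? item = some v :=
        Option.isSome_iff_exists.mp (by rw [← PySem.Dict.contains_eq_isSome_get?]; exact h)
      simp [PySem.Dict.getD_eq_get?_getD, hv]
    · have h' : res.contains item = false := by simpa using h
      simp only [h', Bool.false_eq_true, if_false]
      rw [PySem.Dict.getD_insert_self, PySem.Dict.getD_of_not_contains _ _ h',
        PySem.Dict.insert_insert_self]

-- unfolding lemmas for one iteration of A's loop, one per branch
lemma pvALoop_digit_nil (item_map : List (String × Int × Int)) (t : String)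
    (res : PySem.Dict String (Int × Int))
    (hd : PySem.Str.strIsdigit (PySem.Str.stripChars t ",.!?") = true) :
    pvALoop item_map [t] res = res := by
  have hlist : (",.!?" : String).toList = [',', '.', '!', '?'] := rfl
  simp only [PySem.Str.strIsdigit_eq, PySem.Str.toList_stripChars, hlist] at hd
  conv_lhs => rw [pvALoop.eq_def]
  simp [hd]

lemma pvALoop_digit_cons (item_map : List (String × Int × Int)) (t t2 : String)
    (rest2 : List String) (res : PySem.Dict String (Int × Int))
    (hd : PySem.Str.strIsdigit (PySem.Str.stripChars t ",.!?") = true) :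
    pvALoop item_map (t :: t2 :: rest2) res =
      pvALoop item_map rest2
        (pvAUpdate item_map res (PySem.Str.stripChars t2 ",.!?")
          ((PySem.Int.ofStr? (PySem.Str.stripChars t ",.!?")).getD 0)) := by
  have hlist : (",.!?" : String).toList = [',', '.', '!', '?'] := rfl
  simp only [PySem.Str.strIsdigit_eq, PySem.Str.toList_stripChars, hlist] at hd
  conv_lhs => rw [pvALoop.eq_def]
  simp [hd]

lemma pvALoop_word_nil {q : Int} (item_map : List (String × Int × Int)) (t : String)
    (res : PySem.Dict String (Int × Int))
    (hd : ¬ PySem.Str.strIsdigit (PySem.Str.stripChars t ",.!?") = true)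
    (hq : pvNumWord? (PySem.Str.stripChars t ",.!?") = some q) :
    pvALoop item_map [t] res = res := by
  have hlist : (",.!?" : String).toList = [',', '.', '!', '?'] := rfl
  simp only [PySem.Str.strIsdigit_eq, PySem.Str.toList_stripChars, hlist,
    Bool.not_eq_true] at hd
  conv_lhs => rw [pvALoop.eq_def]
  simp [hd, hq]

lemma pvALoop_word_cons {q : Int} (item_map : List (String × Int × Int)) (t t2 : String)
    (rest2 : List String) (res : PySem.Dict String (Int × Int))
    (hd : ¬ PySem.Str.strIsdigit (PySem.Str.stripChars t ",.!?") = true)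
    (hq : pvNumWord? (PySem.Str.stripChars t ",.!?") = some q) :
    pvALoop item_map (t :: t2 :: rest2) res =
      pvALoop item_map rest2 (pvAUpdate item_map res (PySem.Str.stripChars t2 ",.!?") q) := by
  have hlist : (",.!?" : String).toList = [',', '.', '!', '?'] := rfl
  simp only [PySem.Str.strIsdigit_eq, PySem.Str.toList_stripChars, hlist,
    Bool.not_eq_true] at hd
  conv_lhs => rw [pvALoop.eq_def]
  simp [hd, hq]

lemma pvALoop_item (item_map : List (String × Int × Int)) (t : String) (rest : List String)
    (res : PySem.Dict String (Int × Int))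
    (hd : ¬ PySem.Str.strIsdigit (PySem.Str.stripChars t ",.!?") = true)
    (hq : pvNumWord? (PySem.Str.stripChars t ",.!?") = none) :
    pvALoop item_map (t :: rest) res =
      pvALoop item_map rest (pvAUpdate item_map res (PySem.Str.stripChars t ",.!?") 1) := by
  have hlist : (",.!?" : String).toList = [',', '.', '!', '?'] := rfl
  simp only [PySem.Str.strIsdigit_eq, PySem.Str.toList_stripChars, hlist,
    Bool.not_eq_true] at hd
  conv_lhs => rw [pvALoop.eq_def]
  simp [hd, hq]

-- one step of B's fold, per branch
lemma pvBStep_none_digit (item_map : List (String × Int × Int)) (res : PySem.Dict String (Int × Int))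
    (t : String) (hd : PySem.Str.strIsdigit (PySem.Str.stripChars t ",.!?") = true) :
    pvBStep item_map (none, res) t =
      (some ((PySem.Int.ofStr? (PySem.Str.stripChars t ",.!?")).getD 0), res) := by
  have hlist : (",.!?" : String).toList = [',', '.', '!', '?'] := rfl
  simp only [PySem.Str.strIsdigit_eq, PySem.Str.toList_stripChars, hlist] at hd
  simp [pvBStep, hd]

lemma pvBStep_none_word {q : Int} (item_map : List (String × Int × Int)) (res : PySem.Dict String (Int × Int))
    (t : String) (hd : ¬ PySem.Str.strIsdigit (PySem.Str.stripChars t ",.!?") = true)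
    (hq : pvNumWord? (PySem.Str.stripChars t ",.!?") = some q) :
    pvBStep item_map (none, res) t = (some q, res) := by
  have hlist : (",.!?" : String).toList = [',', '.', '!', '?'] := rfl
  simp only [PySem.Str.strIsdigit_eq, PySem.Str.toList_stripChars, hlist,
    Bool.not_eq_true] at hd
  simp [pvBStep, hd, hq]

lemma pvBStep_none_item (item_map : List (String × Int × Int)) (res : PySem.Dict String (Int × Int))
    (t : String) (hd : ¬ PySem.Str.strIsdigit (PySem.Str.stripChars t ",.!?") = true)
    (hq : pvNumWord? (PySem.Str.stripChars t ",.!?") = none) :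
    pvBStep item_map (none, res) t =
      (none, pvBAdd item_map res (PySem.Str.stripChars t ",.!?") 1) := by
  have hlist : (",.!?" : String).toList = [',', '.', '!', '?'] := rfl
  simp only [PySem.Str.strIsdigit_eq, PySem.Str.toList_stripChars, hlist,
    Bool.not_eq_true] at hd
  simp [pvBStep, hd, hq]

lemma pvBStep_pending (item_map : List (String × Int × Int)) (res : PySem.Dict String (Int × Int))
    (q : Int) (t : String) :
    pvBStep item_map (some q, res) t =
      (none, pvBAdd item_map res (PySem.Str.stripChars t ",.!?") q) := rfl

-- main invariant: A's index loop equals B's fold with no pending quantity.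
lemma pvLoop_eq (item_map : List (String × Int × Int)) :
    ∀ (ts : List String) (res : PySem.Dict String (Int × Int)),
      pvALoop item_map ts res = (ts.foldl (pvBStep item_map) (none, res)).2 := by
  have key : ∀ (n : Nat) (ts : List String), ts.length ≤ n →
      ∀ res, pvALoop item_map ts res = (ts.foldl (pvBStep item_map) (none, res)).2 := by
    intro n
    induction n with
    | zero =>
      intro ts hts res
      match ts with
      | [] => rfl
    | succ n ih =>
      intro ts hts res
      match ts with
      | [] => rfl
      | t :: rest =>
        by_cases hd : PySem.Str.strIsdigit (PySem.Str.stripChars t ",.!?") = true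
        · match rest with
          | [] =>
            rw [pvALoop_digit_nil item_map t res hd, List.foldl_cons,
              pvBStep_none_digit item_map res t hd]
            rfl
          | t2 :: rest2 =>
            rw [pvALoop_digit_cons item_map t t2 rest2 res hd, List.foldl_cons,
              pvBStep_none_digit item_map res t hd, List.foldl_cons, pvBStep_pending,
              pvUpdate_eq]
            exact ih rest2 (by simp at hts ⊢; omega) _
        · cases hq : pvNumWord? (PySem.Str.stripChars t ",.!?") with
          | some q =>
            match rest with
            | [] =>
              rw [pvALoop_word_nil item_map t res hd hq, List.foldl_cons,
                pvBStep_none_word item_map res t hd hq]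
              rfl
            | t2 :: rest2 =>
              rw [pvALoop_word_cons item_map t t2 rest2 res hd hq, List.foldl_cons,
                pvBStep_none_word item_map res t hd hq, List.foldl_cons, pvBStep_pending,
                pvUpdate_eq]
              exact ih rest2 (by simp at hts ⊢; omega) _
          | none =>
            rw [pvALoop_item item_map t rest res hd hq, List.foldl_cons,
              pvBStep_none_item item_map res t hd hq, pvUpdate_eq]
            exact ih rest (by simp at hts; omega) _
  intro ts res
  exact key ts.length ts le_rfl res

-- ===== VERDICT (by name: the statement is the Claim_ definition above) =====
theorem parse_caption_items_naive_spec : Claim_equal_parse_caption_items_naive := by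
  intro caption item_map _
  unfold Spec_parse_caption_items_naive parse_caption_items_naive parse_caption_items_naive_alt
  rw [pvLoop_eq]
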